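-- pv_equiv track=rewrite | github.com/dev-jaemin/BOJ_Study | divide-and-conquer/4779.py | make_cantor_set
-- ===== SOURCE A (Python) =====
-- from collections import defaultdict
--
-- answers = defaultdict(int)
--
-- def make_cantor_set(N, sentence):
--     if N == 0:
--         return sentence
--
--     if answers[str(N)]:
--         return answers[str(N)]
--
--     next_str_length = 3 ** (N - 1)
--     white_str = ' ' * next_str_length
--
--     return make_cantor_set(N - 1, sentence[:next_str_length]) + make_cantor_set(N - 1, white_str) + make_cantor_set(N - 1, sentence[2 * next_str_length:])
-- ===== SOURCE B (Python) =====
-- def make_cantor_set(N, sentence):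
--     if N == 0:
--         return sentence
--     mask = [True]
--     for _ in range(N):
--         mask = mask + [False] * len(mask) + mask
--     return ''.join(sentence[i:i+1] if mask[i] else ' ' for i in range(len(mask)))
-- ===== Notes on version B (the rewrite author's own statement) =====
-- stated objective: alternative
-- what changed: Replaces A's top-down recursion with slicing at every level by a bottom-up tripling that builds the keep/space mask once and then emits each output character in a single pass.
-- intended difference: When N >= 1 and len(sentence) > 3**N, A's rightmost recursion receives the open-ended slice sentence[2*3**(N-1):] and so appends the whole surplus tail past position 3**N, while B emits exactly one character per mask position and returns the length-3**N Cantor string, which is the intended output for this function. — e.g. on make_cantor_set(1, "abcd"): A returns "a cd", B returns "a c"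
import Mathlib
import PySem

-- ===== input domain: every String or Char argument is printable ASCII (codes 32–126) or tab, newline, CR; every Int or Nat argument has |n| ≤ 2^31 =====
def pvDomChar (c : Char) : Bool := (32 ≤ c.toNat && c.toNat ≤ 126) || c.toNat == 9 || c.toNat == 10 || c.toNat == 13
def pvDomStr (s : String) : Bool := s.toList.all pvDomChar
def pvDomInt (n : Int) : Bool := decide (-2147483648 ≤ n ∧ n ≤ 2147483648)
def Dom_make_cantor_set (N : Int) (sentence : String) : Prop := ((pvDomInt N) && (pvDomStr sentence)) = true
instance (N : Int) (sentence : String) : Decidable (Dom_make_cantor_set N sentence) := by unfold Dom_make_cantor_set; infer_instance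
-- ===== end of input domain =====

-- B replaces A's top-down recursion (slicing at every level) by a bottom-up tripled
-- keep/space mask and one output pass over it.

-- ===== PORT A =====
-- the module-level memo dict: defaultdict(int) that is never written, so lookups give 0
def pvAnswers : PySem.Dict String Int := PySem.Dict.empty

-- recursion of A with the nonnegative N as structural fuel (Pre_ excludes N < 0,
-- where Python raises TypeError because 3**(N-1) is a float)
def pvGoA : Nat → List Char → List Char
  | 0, s => s
  | n + 1, s =>
    -- `if answers[str(N)]:` — the memo is never written, so the lookup gives 0 and the branch never fires
    if (PySem.Dict.getD pvAnswers (PySem.Int.toStr ((n : Int) + 1)) 0) ≠ 0 then s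
    else
      let k : Int := (3 : Int) ^ n                           -- next_str_length = 3 ** (N - 1)
      let white : List Char := PySem.List.pyRepeat [' '] k   -- ' ' * next_str_length
      pvGoA n (PySem.List.slice s none (some k)) ++
        pvGoA n white ++
        pvGoA n (PySem.List.slice s (some (2 * k)) none)

def make_cantor_set (N : Int) (sentence : String) : String :=
  String.ofList (pvGoA N.toNat sentence.toList)

-- ===== PORT B =====
def make_cantor_set_alt (N : Int) (sentence : String) : String :=
  if N = 0 then sentence
  else
    let s := sentence.toList
    let mask := (List.range N.toNat).foldl
      (fun m _ => m ++ List.replicate m.length false ++ m) [true]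
    String.ofList
      (((List.range mask.length).map
        (fun i => if mask.getD i false then PySem.List.slice s (some (i : Int)) (some ((i : Int) + 1)) else [' '])).flatten)

-- ===== PRECONDITION & SPEC =====
-- Pre_ excludes N < 0, where A raises TypeError (3**(N-1) is a float there), and
-- N > 40, where the length 3**(N-1) exceeds ssize_t and ' ' * 3**(N-1) raises OverflowError.
def Pre_make_cantor_set (N : Int) (sentence : String) : Prop := 0 ≤ N ∧ N ≤ 40
instance (N : Int) (sentence : String) : Decidable (Pre_make_cantor_set N sentence) := by
  unfold Pre_make_cantor_set; infer_instance
def pvWitness_make_cantor_set : Int × String := (1, "abc")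

-- When N ≥ 1 and len(sentence) > 3**N, A's rightmost recursion gets the open-ended slice
-- sentence[2*3**(N-1):] and so appends the whole surplus tail past position 3**N, while B
-- returns the length-3**N Cantor string, the intended output.
def D_make_cantor_set (N : Int) (sentence : String) : Prop :=
  1 ≤ N ∧ (3 : Int) ^ N.toNat < sentence.length
instance (N : Int) (sentence : String) : Decidable (D_make_cantor_set N sentence) := by
  unfold D_make_cantor_set; infer_instance

def Spec_make_cantor_set (N : Int) (sentence : String) (out : String) : Prop :=
  ¬ D_make_cantor_set N sentence → out = make_cantor_set_alt N sentence
instance (N : Int) (sentence : String) (out : String) : Decidable (Spec_make_cantor_set N sentence out) := by unfold Spec_make_cantor_set; infer_instance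

def pvDiffWitness_make_cantor_set : Int × String := (1, "abcd")
def pvDiffWitnessOut_make_cantor_set : String × String := ("a cd", "a c")

-- ===== CLAIM (what is proved, stated in full; the proofs are below) =====
def Claim_unchanged_make_cantor_set : Prop := ∀ (N : Int) (sentence : String), Dom_make_cantor_set N sentence → Pre_make_cantor_set N sentence → Spec_make_cantor_set N sentence (make_cantor_set N sentence)
def Claim_changed_make_cantor_set : Prop := Dom_make_cantor_set (pvDiffWitness_make_cantor_set.1) (pvDiffWitness_make_cantor_set.2) ∧ Pre_make_cantor_set (pvDiffWitness_make_cantor_set.1) (pvDiffWitness_make_cantor_set.2) ∧ D_make_cantor_set (pvDiffWitness_make_cantor_set.1) (pvDiffWitness_make_cantor_set.2) ∧ make_cantor_set (pvDiffWitness_make_cantor_set.1) (pvDiffWitness_make_cantor_set.2) = pvDiffWitnessOut_make_cantor_set.1 ∧ make_cantor_set_alt (pvDiffWitness_make_cantor_set.1) (pvDiffWitness_make_cantor_set.2) = pvDiffWitnessOut_make_cantor_set.2 ∧ pvDiffWitnessOut_make_cantor_set.1 ≠ pvDiffWitnessOut_make_cantor_set.2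
def Claim_exact_make_cantor_set : Prop := ∀ (N : Int) (sentence : String), Dom_make_cantor_set N sentence → Pre_make_cantor_set N sentence → D_make_cantor_set N sentence → make_cantor_set N sentence ≠ make_cantor_set_alt N sentence

-- ===== LEMMAS AND PROOFS =====

-- the recursively tripled mask that B's foldl builds
def pvMaskRec : Nat → List Bool
  | 0 => [true]
  | n + 1 => pvMaskRec n ++ List.replicate (3 ^ n) false ++ pvMaskRec n

theorem pvMaskRec_length (n : Nat) : (pvMaskRec n).length = 3 ^ n := by
  induction n with
  | zero => rfl
  | succ n ih => simp [pvMaskRec, ih, pow_succ]; ring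

theorem pvMask_foldl (n : Nat) :
    (List.range n).foldl (fun m _ => m ++ List.replicate m.length false ++ m) [true]
      = pvMaskRec n := by
  induction n with
  | zero => rfl
  | succ n ih =>
    rw [List.range_succ, List.foldl_append, ih]
    simp [pvMaskRec, pvMaskRec_length]

theorem pvMaskRec_last (n : Nat) : (pvMaskRec n).getD (3 ^ n - 1) false = true := by
  induction n with
  | zero => rfl
  | succ n ih =>
    have h1 : (3:Nat) ^ n ≥ 1 := Nat.one_le_pow _ _ (by norm_num)
    have hlen : ((pvMaskRec n ++ List.replicate (3 ^ n) false).length) = 2 * 3 ^ n := by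
      simp [pvMaskRec_length]; ring
    have hidx : (3:Nat) ^ (n+1) - 1 = 2 * 3 ^ n + (3 ^ n - 1) := by
      rw [pow_succ]; omega
    rw [pvMaskRec, hidx,
        List.getD_append_right _ _ _ _ (by omega)]
    rw [hlen]
    simpa using ih

-- lookups in the tripled mask
theorem pvMaskRec_succ_getD_left (n i : Nat) (hi : i < 3 ^ n) :
    (pvMaskRec (n + 1)).getD i false = (pvMaskRec n).getD i false := by
  rw [pvMaskRec,
      List.getD_append _ _ _ _ (by simp [pvMaskRec_length]; omega),
      List.getD_append _ _ _ _ (by simp [pvMaskRec_length]; omega)]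

theorem pvGetD_replicate (m j : Nat) : (List.replicate m false).getD j false = false := by
  rcases Nat.lt_or_ge j m with h | h
  · simp [List.getD_eq_getElem?_getD, List.getElem?_replicate, h]
  · simp [List.getD_eq_getElem?_getD, List.getElem?_replicate, Nat.not_lt.mpr h]

theorem pvMaskRec_succ_getD_mid (n i : Nat) (h1 : 3 ^ n ≤ i) (h2 : i < 2 * 3 ^ n) :
    (pvMaskRec (n + 1)).getD i false = false := by
  rw [pvMaskRec,
      List.getD_append _ _ _ _ (by simp [pvMaskRec_length]; omega),
      List.getD_append_right _ _ _ _ (by simp [pvMaskRec_length]; omega)]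
  rw [pvMaskRec_length, pvGetD_replicate]

theorem pvMaskRec_succ_getD_right (n i : Nat) (h1 : 2 * 3 ^ n ≤ i) :
    (pvMaskRec (n + 1)).getD i false = (pvMaskRec n).getD (i - 2 * 3 ^ n) false := by
  rw [pvMaskRec,
      List.getD_append_right _ _ _ _ (by simp [pvMaskRec_length]; omega)]
  congr 1
  simp [pvMaskRec_length]
  omega

-- A's rendering against the mask, written directly on lists
def pvRend (n : Nat) (s : List Char) : List Char :=
  ((List.range (3 ^ n - 1)).map
      (fun i => if (pvMaskRec n).getD i false then (s.drop i).take 1 else [' '])).flatten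
    ++ s.drop (3 ^ n - 1)

theorem pvFlatten_const (m : Nat) (a : Char) (f : Nat → List Char)
    (h : ∀ i ∈ List.range m, f i = [a]) :
    ((List.range m).map f).flatten = List.replicate m a := by
  induction m with
  | zero => rfl
  | succ m ih =>
    rw [List.range_succ, List.map_append, List.flatten_append,
        ih (fun i hi => h i (by simp at hi ⊢; omega))]
    simp [h m (by simp), List.replicate_succ']

theorem pvRend_spaces (n : Nat) : pvRend n (List.replicate (3 ^ n) ' ') = List.replicate (3 ^ n) ' ' := by
  have h1 : (3:Nat) ^ n ≥ 1 := Nat.one_le_pow _ _ (by norm_num)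
  unfold pvRend
  rw [pvFlatten_const (3 ^ n - 1) ' '
      _ (fun i hi => by
        simp only [List.mem_range] at hi
        split
        · rw [List.drop_replicate, List.take_replicate]
          have : min 1 (3 ^ n - i) = 1 := by omega
          rw [this]; rfl
        · rfl)]
  rw [List.drop_replicate]
  have h2 : (3:Nat) ^ n - (3 ^ n - 1) = 1 := by omega
  rw [h2, ← List.replicate_add]
  congr 1; omega

theorem pvRend_zero (s : List Char) : pvRend 0 s = s := by
  simp [pvRend]

theorem pvRend_succ (n : Nat) (s : List Char) :
    pvRend (n + 1) s
      = pvRend n (s.take (3 ^ n)) ++ List.replicate (3 ^ n) ' ' ++ pvRend n (s.drop (2 * 3 ^ n)) := by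
  have h1 : (3:Nat) ^ n ≥ 1 := Nat.one_le_pow _ _ (by norm_num)
  set k := (3:Nat) ^ n with hk
  have hsplit : (3:Nat) ^ (n+1) - 1 = k + (k + (k - 1)) := by rw [pow_succ]; omega
  unfold pvRend
  have hA : (List.range (k + (k + (k - 1)))).map
        (fun i => if (pvMaskRec (n+1)).getD i false then (s.drop i).take 1 else [' '])
      = (List.range k).map
          (fun i => if (pvMaskRec (n+1)).getD i false then (s.drop i).take 1 else [' '])
        ++ (List.range k).map
          (fun j => if (pvMaskRec (n+1)).getD (k + j) false then (s.drop (k + j)).take 1 else [' '])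
        ++ (List.range (k - 1)).map
          (fun j => if (pvMaskRec (n+1)).getD (k + (k + j)) false then (s.drop (k + (k + j))).take 1 else [' ']) := by
    rw [List.range_add, List.range_add]
    simp [List.map_append, List.map_map, Function.comp_def]
  rw [hsplit, hA, List.flatten_append, List.flatten_append]
  -- left block: range k, last index k-1 becomes the left recursion's suffix
  have hleft :
      ((List.range k).map
          (fun i => if (pvMaskRec (n+1)).getD i false then (s.drop i).take 1 else [' '])).flatten
        = ((List.range (k - 1)).map
            (fun i => if (pvMaskRec n).getD i false then ((s.take k).drop i).take 1 else [' '])).flatten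
          ++ (s.take k).drop (k - 1) := by
    have hkk : k = (k - 1) + 1 := by omega
    conv_lhs => rw [hkk, List.range_succ]
    rw [List.map_append, List.flatten_append]
    congr 1
    · apply congrArg
      apply List.map_congr_left
      intro i hi
      simp only [List.mem_range] at hi
      rw [pvMaskRec_succ_getD_left n i (by omega)]
      congr 1
      rw [List.drop_take, List.take_take]
      congr 1
      omega
    · have hlast : (pvMaskRec (n+1)).getD (k - 1) false = true := by
        rw [pvMaskRec_succ_getD_left n (k-1) (by omega)]
        have := pvMaskRec_last n
        rwa [← hk] at this
      simp only [List.map_cons, List.map_nil, List.flatten_cons, List.flatten_nil,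
                 List.append_nil, hlast, if_true]
      rw [List.drop_take]
      have : k - (k - 1) = 1 := by omega
      rw [this]
  -- middle block: all spaces
  have hmid :
      ((List.range k).map
          (fun j => if (pvMaskRec (n+1)).getD (k + j) false then (s.drop (k + j)).take 1 else [' '])).flatten
        = List.replicate k ' ' := by
    apply pvFlatten_const
    intro j hj
    simp only [List.mem_range] at hj
    rw [pvMaskRec_succ_getD_mid n (k + j) (by omega) (by omega)]
    rfl
  -- right block: indices 2k + j back onto the right recursion
  have hright :
      ((List.range (k - 1)).map
          (fun j => if (pvMaskRec (n+1)).getD (k + (k + j)) false then (s.drop (k + (k + j))).take 1 else [' '])).flatten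
          ++ s.drop (k + (k + (k - 1)))
        = ((List.range (k - 1)).map
            (fun i => if (pvMaskRec n).getD i false then ((s.drop (2*k)).drop i).take 1 else [' '])).flatten
          ++ (s.drop (2*k)).drop (k - 1) := by
    congr 1
    · apply congrArg
      apply List.map_congr_left
      intro j hj
      simp only [List.mem_range] at hj
      have hidx : k + (k + j) = 2 * k + j := by omega
      rw [hidx, pvMaskRec_succ_getD_right n (2*k + j) (by omega)]
      have h2 : 2 * k + j - 2 * k = j := by omega
      rw [h2]
      congr 1
      rw [List.drop_drop]
    · rw [List.drop_drop]
      congr 1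
      omega
  rw [hleft, hmid]
  simp only [List.append_assoc]
  congr 3

theorem pvGoA_eq_rend (n : Nat) (s : List Char) : pvGoA n s = pvRend n s := by
  induction n generalizing s with
  | zero => simp [pvGoA, pvRend_zero]
  | succ n ih =>
    have hPow : ((3:Int) ^ n) = ((3 ^ n : Nat) : Int) := by push_cast; ring
    simp only [pvGoA]
    rw [if_neg (by simp [pvAnswers, PySem.Dict.empty, PySem.Dict.getD, PySem.Dict.get?])]
    rw [ih, ih, ih, pvRend_succ]
    congr 1
    · congr 1
      · congr 1
        rw [hPow, PySem.List.slice_to_natCast]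
      · rw [hPow]
        have : PySem.List.pyRepeat [' '] ((3 ^ n : Nat) : Int) = List.replicate (3 ^ n) ' ' := by
          rw [PySem.List.pyRepeat_singleton, Int.toNat_natCast]
        rw [this, pvRend_spaces]
    · congr 1
      have : (2 * ((3:Int) ^ n)) = ((2 * 3 ^ n : Nat) : Int) := by push_cast; ring
      rw [this, PySem.List.slice_from_natCast]

-- B's rendering on lists: the full per-index pass over all 3^n mask positions
def pvRendB (n : Nat) (s : List Char) : List Char :=
  ((List.range (3 ^ n)).map
      (fun i => if (pvMaskRec n).getD i false then (s.drop i).take 1 else [' '])).flatten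

theorem pvAlt_eq_rendB (N : Int) (sentence : String) (h0 : N ≠ 0) :
    make_cantor_set_alt N sentence = String.ofList (pvRendB N.toNat sentence.toList) := by
  simp only [make_cantor_set_alt, if_neg h0, pvMask_foldl, pvMaskRec_length, pvRendB]
  apply congrArg
  apply congrArg
  apply List.map_congr_left
  intro i hi
  congr 1
  rw [show ((i : Int) + 1) = ((i : Int) + ((1:Nat) : Int)) by norm_num,
      PySem.List.slice_natCast_add sentence.toList i 1]

-- pvRendB splits off its last block, which is take 1 of A's suffix
theorem pvRendB_split (n : Nat) (s : List Char) :
    pvRendB n s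
      = ((List.range (3 ^ n - 1)).map
          (fun i => if (pvMaskRec n).getD i false then (s.drop i).take 1 else [' '])).flatten
        ++ (s.drop (3 ^ n - 1)).take 1 := by
  have h1 : (3:Nat) ^ n ≥ 1 := Nat.one_le_pow _ _ (by norm_num)
  unfold pvRendB
  have hkk : (3:Nat) ^ n = (3 ^ n - 1) + 1 := by omega
  conv_lhs => rw [hkk, List.range_succ]
  rw [List.map_append, List.flatten_append]
  congr 1
  have hl : (pvMaskRec n)[3 ^ n - 1]?.getD false = true := pvMaskRec_last n
  simp [hl]

-- ===== VERDICT (by name: the statement is the Claim_ definition above) =====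
theorem make_cantor_set_spec : Claim_unchanged_make_cantor_set := by
  intro N sentence _ hPre hD
  unfold Pre_make_cantor_set at hPre
  obtain ⟨hPre, -⟩ := hPre
  by_cases h0 : N = 0
  · subst h0
    simp [make_cantor_set, make_cantor_set_alt, pvGoA]
  · have hlen : sentence.length ≤ 3 ^ N.toNat := by
      unfold D_make_cantor_set at hD
      push_neg at hD
      have := hD (by omega)
      have hc : ((3:Int) ^ N.toNat) = (((3:Nat) ^ N.toNat : Nat) : Int) := by push_cast; ring
      rw [hc] at this
      exact_mod_cast this
    unfold make_cantor_set
    rw [pvGoA_eq_rend, pvAlt_eq_rendB N sentence h0, pvRendB_split]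
    unfold pvRend
    apply congrArg
    congr 1
    rw [List.take_of_length_le]
    rw [List.length_drop]
    have hls : sentence.toList.length = sentence.length := String.length_toList
    omega

theorem make_cantor_set_changed : Claim_changed_make_cantor_set := by
  unfold Claim_changed_make_cantor_set; decide

theorem make_cantor_set_tight : Claim_exact_make_cantor_set := by
  intro N sentence _ hPre hD
  obtain ⟨hN, hlen⟩ := hD
  have h0 : N ≠ 0 := by omega
  have hlenN : 3 ^ N.toNat < sentence.length := by
    have hc : ((3:Int) ^ N.toNat) = (((3:Nat) ^ N.toNat : Nat) : Int) := by push_cast; ring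
    rw [hc] at hlen
    exact_mod_cast hlen
  have h1 : (3:Nat) ^ N.toNat ≥ 1 := Nat.one_le_pow _ _ (by norm_num)
  unfold make_cantor_set
  rw [pvGoA_eq_rend, pvAlt_eq_rendB N sentence h0]
  intro hEq
  have hL : pvRend N.toNat sentence.toList = pvRendB N.toNat sentence.toList := by
    have h2 := congrArg String.toList hEq
    simpa using h2
  rw [pvRend, pvRendB_split] at hL
  have htail := List.append_cancel_left hL
  have hlc := congrArg List.length htail
  rw [List.length_take, List.length_drop] at hlc
  have hls : sentence.toList.length = sentence.length := String.length_toList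
  omega
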